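-- pv_equiv track=rewrite | github.com/FSoft-AI4Code/AgileCoder | agilecoder/components/utils.py | extract_top_k_errors
-- ===== SOURCE A (Python) =====
-- def extract_top_k_errors(content, k = 1):
--     lines = content.splitlines()
--     results = []
--     start_flag = False
--     count = 0
--     for line in lines:
--         if 'FAILURES' in line:
--             start_flag = True
--         if start_flag and len(results) == 0:
--             results.append(line)
--             continue
--         if line.startswith('_______________'):
--             count += 1
--         if start_flag and count <= k:
--             results.append(line)
--     return '\n'.join(results)
-- ===== SOURCE B (Python) =====
-- def extract_top_k_errors(content, k=1):
--     lines = content.splitlines()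
--     start = next((i for i, line in enumerate(lines) if 'FAILURES' in line), None)
--     if start is None:
--         return ''
--     tail = lines[start + 1:]
--     seps = [i for i, line in enumerate(tail) if line.startswith('_______________')]
--     stop = seps[k] if k < len(seps) else len(tail)
--     return '\n'.join([lines[start]] + tail[:stop])
-- ===== Notes on version B (the rewrite author's own statement) =====
-- stated objective: alternative
-- what changed: Replaces A's flag/counter state machine over every line with a locate-then-table decomposition: find the FAILURES line, build the list of separator-line indices in the tail, cut at the (k+1)-th separator (or take everything), and slice; Pre_ restricts k to the natural domain 0 <= k of a top-k count.
-- intended difference: On inputs that contain a FAILURES line preceded by a separator line, when that shifts the cut position, A silently spends part of the budget k on those pre-header separators (leftover loop state) and returns a block truncated too early, while B counts only failure separators after the header and returns the intended first k failure blocks. — e.g. on extract_top_k_errors("_______________\nFAILURES\na\n_______________\nb", 1): A returns "FAILURES\na", B returns "FAILURES\na\n_______________\nb"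
-- outside the precondition, e.g. on extract_top_k_errors('FAILURES\nx', -1): A returns 'FAILURES', B raises IndexError
import Mathlib
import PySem

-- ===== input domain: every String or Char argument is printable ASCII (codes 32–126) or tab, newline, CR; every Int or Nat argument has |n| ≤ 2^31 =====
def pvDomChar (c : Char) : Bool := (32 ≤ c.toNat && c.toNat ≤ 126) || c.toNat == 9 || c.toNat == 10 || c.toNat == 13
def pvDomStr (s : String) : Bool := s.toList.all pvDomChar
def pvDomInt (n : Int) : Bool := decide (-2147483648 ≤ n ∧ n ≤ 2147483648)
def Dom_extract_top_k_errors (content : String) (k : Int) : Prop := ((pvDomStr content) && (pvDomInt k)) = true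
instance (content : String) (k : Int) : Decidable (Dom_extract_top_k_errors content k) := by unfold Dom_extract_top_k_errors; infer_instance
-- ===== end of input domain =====

-- B replaces A's flag/counter state machine with locate-then-table (separator-index list + slice); objective: alternative.
-- On inputs with a separator line before the FAILURES header A truncates too early (D_ below); B returns the intended block.

-- ===== PORT A =====
-- loop body of A's for-loop; state = (results, start_flag, count)
def aStep (k : Int) (st : List String × Bool × Int) (line : String) : List String × Bool × Int :=
  let start_flag := if PySem.Str.isIn "FAILURES" line then true else st.2.1
  if start_flag && st.1.length == 0 then (st.1 ++ [line], start_flag, st.2.2)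
  else
    let count := if PySem.Str.startswith line "_______________" then st.2.2 + 1 else st.2.2
    if start_flag && decide (count ≤ k) then (st.1 ++ [line], start_flag, count)
    else (st.1, start_flag, count)

def extract_top_k_errors (content : String) (k : Int) : String :=
  let lines := PySem.Str.splitlines content
  let st := lines.foldl (aStep k) ([], false, 0)
  PySem.Str.join "\n" st.1

-- ===== PORT B =====
-- 'seps[k]' is ported as '(pyGet? seps k).getD 0'; exact for 0 ≤ k (Pre_): the else-branch of the if is never the getD default there.
def extract_top_k_errors_alt (content : String) (k : Int) : String :=
  let lines := PySem.Str.splitlines content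
  match lines.findIdx? (fun l => PySem.Str.isIn "FAILURES" l) with
  | none => ""
  | some start =>
    let tail := lines.drop (start + 1)
    let seps := ((PySem.List.enumerate tail).filter (fun p => PySem.Str.startswith p.2 "_______________")).map (·.1)
    let stop : Int := if k < (seps.length : Int) then (PySem.List.pyGet? seps k).getD 0 else (tail.length : Int)
    PySem.Str.join "\n" ((lines[start]?.getD "") :: tail.take stop.toNat)

-- ===== PRECONDITION & SPEC =====
-- helpers used by D_ (input-boundary description only; neither port is referenced)
def pvSep (l : String) : Bool := PySem.Str.startswith l "_______________"

-- Pre_ restricts k to the natural domain of a top-k count: 0 ≤ k (for negative k B's own slice lookup may raise).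
def Pre_extract_top_k_errors (content : String) (k : Int) : Prop := 0 ≤ k
instance (content : String) (k : Int) : Decidable (Pre_extract_top_k_errors content k) := by unfold Pre_extract_top_k_errors; infer_instance
def pvWitness_extract_top_k_errors : String × Int := ("FAILURES\nboom", 1)

-- On inputs where a separator line precedes the first FAILURES line and this shifts the cut position, A spends part of
-- the budget k on those pre-header separators and truncates too early; B counts only separators after the header (intended).
def D_extract_top_k_errors (content : String) (k : Int) : Prop :=
  let ls := PySem.Str.splitlines content
  let a := ls.takeWhile (!PySem.Str.isIn "FAILURES" ·)
  let t := ls.drop a.length.succ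
  let p := a.countP pvSep
  t.length ≠ 0 ∧ 0 < p ∧ k < p + t.countP pvSep ∧ (0 < k ∨ ¬ pvSep (t.headD ""))
instance (content : String) (k : Int) : Decidable (D_extract_top_k_errors content k) := by unfold D_extract_top_k_errors; infer_instance

def Spec_extract_top_k_errors (content : String) (k : Int) (out : String) : Prop := ¬ D_extract_top_k_errors content k → out = extract_top_k_errors_alt content k
instance (content : String) (k : Int) (out : String) : Decidable (Spec_extract_top_k_errors content k out) := by unfold Spec_extract_top_k_errors; infer_instance

def pvDiffWitness_extract_top_k_errors : String × Int := ("_______________\nFAILURES\na\n_______________\nb", 1)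
def pvDiffWitnessOut_extract_top_k_errors : String × String := ("FAILURES\na", "FAILURES\na\n_______________\nb")

-- ===== CLAIM (what is proved, stated in full; the proofs are below) =====
def Claim_unchanged_extract_top_k_errors : Prop := ∀ (content : String) (k : Int), Dom_extract_top_k_errors content k → Pre_extract_top_k_errors content k → Spec_extract_top_k_errors content k (extract_top_k_errors content k)
def Claim_changed_extract_top_k_errors : Prop := Dom_extract_top_k_errors (pvDiffWitness_extract_top_k_errors.1) (pvDiffWitness_extract_top_k_errors.2) ∧ Pre_extract_top_k_errors (pvDiffWitness_extract_top_k_errors.1) (pvDiffWitness_extract_top_k_errors.2) ∧ D_extract_top_k_errors (pvDiffWitness_extract_top_k_errors.1) (pvDiffWitness_extract_top_k_errors.2) ∧ extract_top_k_errors (pvDiffWitness_extract_top_k_errors.1) (pvDiffWitness_extract_top_k_errors.2) = pvDiffWitnessOut_extract_top_k_errors.1 ∧ extract_top_k_errors_alt (pvDiffWitness_extract_top_k_errors.1) (pvDiffWitness_extract_top_k_errors.2) = pvDiffWitnessOut_extract_top_k_errors.2 ∧ pvDiffWitnessOut_extract_top_k_errors.1 ≠ pvDiffWitnessOut_extrac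t_top_k_errors.2
def Claim_exact_extract_top_k_errors : Prop := ∀ (content : String) (k : Int), Dom_extract_top_k_errors content k → Pre_extract_top_k_errors content k → D_extract_top_k_errors content k → extract_top_k_errors content k ≠ extract_top_k_errors_alt content k

-- ===== LEMMAS AND PROOFS =====

def pvHasF (l : String) : Bool := PySem.Str.isIn "FAILURES" l

-- positions of separator lines
def pvSepIdx : List String → List Nat
  | [] => []
  | l :: ls => if pvSep l then 0 :: (pvSepIdx ls).map (· + 1) else (pvSepIdx ls).map (· + 1)

-- cut position via the separator-index table
def pvCutIdx (budget : Int) (sidx : List Nat) (len : Nat) : Nat :=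
  if budget < 0 then 0
  else match sidx[budget.toNat]? with
    | some j => j
    | none => len

-- the block of lines A appends after the FAILURES line, given count c accumulated so far
def pvWin (k c : Int) : List String → List String
  | [] => []
  | l :: ls =>
    let c' := if pvSep l then c + 1 else c
    if c' ≤ k then l :: pvWin k c' ls else pvWin k c' ls

-- one step of A's loop once the flag is set and results is nonempty
theorem pvAStepMain (k : Int) (x : String) (r : List String) (c : Int) (l : String) :
    aStep k (x :: r, true, c) l
        = (if (if pvSep l then c + 1 else c) ≤ k then x :: r ++ [l] else x :: r, true,
           if pvSep l then c + 1 else c) := by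
  simp only [aStep, pvSep]
  rcases Bool.eq_false_or_eq_true (PySem.Str.isIn "FAILURES" l) with hf | hf <;>
    rcases Bool.eq_false_or_eq_true (PySem.Str.startswith l "_______________") with hs | hs <;>
      simp only [hf, hs, if_true, Bool.true_and, List.length_cons] <;>
        by_cases hk : c + 1 ≤ k <;>
          by_cases hck : c ≤ k <;>
            simp [hk, hck]

-- Phase 1: before any FAILURES line, A only counts separators.
theorem pvFoldPre (k : Int) (pfx : List String) (c : Int)
    (h : ∀ l ∈ pfx, pvHasF l = false) :
    pfx.foldl (aStep k) ([], false, c) = ([], false, c + ((pfx.filter pvSep).length : Int)) := by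
  induction pfx generalizing c with
  | nil => simp
  | cons l ls ih =>
    have hl : pvHasF l = false := h l (by simp)
    have hrest : ∀ x ∈ ls, pvHasF x = false := fun x hx => h x (by simp [hx])
    simp only [List.foldl_cons]
    rw [show aStep k ([], false, c) l
        = ([], false, if pvSep l then c + 1 else c) by
      simp [aStep, pvHasF] at hl ⊢
      simp [hl, pvSep]]
    rw [ih _ hrest]
    by_cases hs : pvSep l = true <;> simp [hs] <;> push_cast <;> ring

-- Phase 2: with the flag set and results nonempty, A appends exactly pvWin.
theorem pvFoldMain (k : Int) (ls : List String) (x : String) (r : List String) (c : Int) :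
    (ls.foldl (aStep k) (x :: r, true, c)).1 = x :: r ++ pvWin k c ls := by
  induction ls generalizing r c with
  | nil => simp [pvWin]
  | cons l ls ih =>
    simp only [List.foldl_cons, pvAStepMain, pvWin]
    by_cases hc : (if pvSep l then c + 1 else c) ≤ k
    · rw [if_pos hc, if_pos hc, List.cons_append, ih]
      simp
    · rw [if_neg hc, if_neg hc, ih]

-- pvWin is empty once the budget is exhausted
theorem pvWinNeg (k c : Int) (ls : List String) (h : k < c) : pvWin k c ls = [] := by
  induction ls generalizing c with
  | nil => rfl
  | cons l ls ih =>
    simp only [pvWin]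
    rcases Bool.eq_false_or_eq_true (pvSep l) with hs | hs <;> simp [hs]
    · rw [if_neg (by omega)]; exact ih _ (by omega)
    · rw [if_neg (by omega)]; exact ih _ h

theorem pvWinTake (k c : Int) (ls : List String) (h : 0 ≤ k - c) :
    pvWin k c ls = match (pvSepIdx ls)[(k - c).toNat]? with
      | some j => ls.take j
      | none => ls := by
  induction ls generalizing c with
  | nil => simp [pvWin, pvSepIdx]
  | cons l ls ih =>
    simp only [pvWin, pvSepIdx]
    rcases Bool.eq_false_or_eq_true (pvSep l) with hs | hs <;> simp only [hs, Bool.false_eq_true, if_false, if_true]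
    · by_cases hck : c + 1 ≤ k
      · rw [if_pos hck, ih _ (by omega)]
        have hn : (k - c).toNat = (k - (c + 1)).toNat + 1 := by omega
        rw [hn]
        simp only [List.getElem?_cons_succ, List.getElem?_map]
        cases hj : (pvSepIdx ls)[(k - (c + 1)).toNat]? <;> simp [hj]
      · rw [if_neg hck, pvWinNeg k (c + 1) ls (by omega)]
        have hn : (k - c).toNat = 0 := by omega
        simp [hn]
    · rw [if_pos (by omega), ih _ h]
      simp only [List.getElem?_map]
      cases hj : (pvSepIdx ls)[(k - c).toNat]? <;> simp [hj]

-- A's post-header block is a take at the pvCutIdx position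
theorem pvWinCut (k c : Int) (ls : List String) :
    pvWin k c ls = ls.take (pvCutIdx (k - c) (pvSepIdx ls) ls.length) := by
  by_cases h : k - c < 0
  · rw [pvWinNeg k c ls (by omega)]
    simp [pvCutIdx, h]
  · rw [pvWinTake k c ls (by omega)]
    simp only [pvCutIdx, if_neg h]
    cases hj : (pvSepIdx ls)[(k - c).toNat]? <;> simp [hj]

theorem pvEnumSeps (ls : List String) (s : Int) :
    ((PySem.List.enumerate ls s).filter (fun p => PySem.Str.startswith p.2 "_______________")).map (·.1)
      = (pvSepIdx ls).map (fun j : Nat => s + (j : Int)) := by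
  induction ls generalizing s with
  | nil => simp [pvSepIdx, PySem.List.enumerate_nil]
  | cons l ls ih =>
    rcases Bool.eq_false_or_eq_true (PySem.Str.startswith l "_______________") with hs | hs
    all_goals have hs' := hs
    all_goals simp at hs'
    · rw [PySem.List.enumerate_cons,
        show pvSepIdx (l :: ls) = 0 :: (pvSepIdx ls).map (· + 1) from by simp [pvSepIdx, pvSep, hs'],
        List.filter_cons_of_pos (by exact hs),
        List.map_cons, List.map_cons, ih, List.map_map]
      refine congrArg₂ List.cons (by simp) (List.map_congr_left fun j _ => ?_)
      simp only [Function.comp_apply]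
      push_cast
      ring
    · rw [PySem.List.enumerate_cons,
        show pvSepIdx (l :: ls) = (pvSepIdx ls).map (· + 1) from by simp [pvSepIdx, pvSep, hs'],
        List.filter_cons_of_neg (by simp only [hs]; exact Bool.false_ne_true),
        ih, List.map_map]
      exact List.map_congr_left fun j _ => by simp only [Function.comp_apply]; push_cast; ring

-- B's stop index equals the index-table cut, for 0 ≤ k
theorem pvStopEq (k : Int) (hk : 0 ≤ k) (tail : List String) :
    (if k < ((((PySem.List.enumerate tail).filter (fun p => PySem.Str.startswith p.2 "_______________")).map (·.1)).length : Int)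
      then (PySem.List.pyGet? (((PySem.List.enumerate tail).filter (fun p => PySem.Str.startswith p.2 "_______________")).map (·.1)) k).getD 0
      else (tail.length : Int)).toNat = pvCutIdx k (pvSepIdx tail) tail.length := by
  rw [show PySem.List.enumerate tail = PySem.List.enumerate tail 0 from rfl, pvEnumSeps tail 0]
  have hcast : k = ((k.toNat : Nat) : Int) := (Int.toNat_of_nonneg hk).symm
  by_cases hlt : k < (((pvSepIdx tail).map (fun j : Nat => (0:Int) + (j : Int))).length : Int)
  · rw [if_pos hlt]
    have hlen : k.toNat < (pvSepIdx tail).length := by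
      simp only [List.length_map] at hlt; omega
    rw [hcast, PySem.List.pyGet?_natCast, List.getElem?_map,
        List.getElem?_eq_getElem hlen]
    simp only [Option.map_some, Option.getD_some]
    unfold pvCutIdx
    rw [if_neg (by omega)]
    simp only [Int.toNat_natCast]
    rw [List.getElem?_eq_getElem hlen]
    simp
  · rw [if_neg hlt]
    have hge : (pvSepIdx tail).length ≤ k.toNat := by
      simp only [List.length_map] at hlt; omega
    unfold pvCutIdx
    rw [if_neg (by omega), List.getElem?_eq_none hge]
    simp

-- every separator position is a valid index
theorem pvSepIdxLt (ls : List String) : ∀ j ∈ pvSepIdx ls, j < ls.length := by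
  induction ls with
  | nil => simp [pvSepIdx]
  | cons l ls ih =>
    intro j hj
    simp only [pvSepIdx] at hj
    by_cases hs : pvSep l = true <;> simp [hs] at hj
    · rcases hj with rfl | ⟨i, hi, rfl⟩
      · simp
      · have := ih i hi; simp; omega
    · rcases hj with ⟨i, hi, rfl⟩
      have := ih i hi; simp; omega

theorem pvCutLe (b : Int) (ls : List String) : pvCutIdx b (pvSepIdx ls) ls.length ≤ ls.length := by
  unfold pvCutIdx
  by_cases h : b < 0
  · simp [h]
  · rw [if_neg h]
    cases hj : (pvSepIdx ls)[b.toNat]? with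
    | none => exact le_refl _
    | some j => exact le_of_lt (pvSepIdxLt ls j (List.mem_of_getElem? hj))

-- length of a joined nonempty list of lines
theorem pvJoinLen (s a : List Char) (l : List (List Char)) :
    (PySem.Chars.join s (a :: l)).length = a.length + (l.map (fun e => s.length + e.length)).sum := by
  induction l generalizing a with
  | nil => simp [PySem.Chars.join_singleton]
  | cons b l ih =>
    rw [PySem.Chars.join_cons_cons]
    simp only [List.length_append, ih, List.map_cons, List.sum_cons]
    omega

-- a strictly shorter take gives a strictly shorter joined string
theorem pvJoinTakeNe (h : String) (tail : List String) (m n : Nat)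
    (hm : m ≤ tail.length) (hn : n ≤ tail.length) (hne : m ≠ n) :
    PySem.Str.join "\n" (h :: tail.take m) ≠ PySem.Str.join "\n" (h :: tail.take n) := by
  intro heq
  have hlen : (PySem.Str.join "\n" (h :: tail.take m)).toList.length
      = (PySem.Str.join "\n" (h :: tail.take n)).toList.length := by rw [heq]
  rw [PySem.Str.toList_join, PySem.Str.toList_join] at hlen
  simp only [List.map_cons, List.map_take] at hlen
  rw [pvJoinLen, pvJoinLen] at hlen
  rw [← List.map_take, ← List.map_take, List.map_map, List.map_map] at hlen
  have hpos : ∀ (e : String), 0 < ((fun e => ("\n".toList).length + e.length) ∘ String.toList) e := by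
    intro e; simp
  -- sums of prefixes of a positive-valued sequence determine the prefix length
  have key : ∀ (f : String → Nat), (∀ e, 0 < f e) → ∀ (xs : List String) (m n : Nat), m ≤ xs.length → n ≤ xs.length →
      ((xs.take m).map f).sum = ((xs.take n).map f).sum → m = n := by
    intro f hf xs
    induction xs with
    | nil => intro m n hm hn _; simp at hm hn; omega
    | cons x xs ih =>
      intro m n hm hn hsum
      cases m with
      | zero =>
        cases n with
        | zero => rfl
        | succ n =>
          simp only [List.take_zero, List.map_nil, List.sum_nil, List.take_succ_cons,
            List.map_cons, List.sum_cons] at hsum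
          have := hf x; omega
      | succ m =>
        cases n with
        | zero =>
          simp only [List.take_zero, List.map_nil, List.sum_nil, List.take_succ_cons,
            List.map_cons, List.sum_cons] at hsum
          have := hf x; omega
        | succ n =>
          simp only [List.take_succ_cons, List.map_cons, List.sum_cons] at hsum
          simp only [List.length_cons] at hm hn
          have := ih m n (by omega) (by omega) (by omega)
          omega
  exact hne (key _ hpos tail m n hm hn (by omega))

-- the common decomposition of both ports when a FAILURES line exists at index start
theorem pvMainEq (content : String) (k : Int) (start : Nat)
    (hfind : (PySem.Str.splitlines content).findIdx? (fun l => PySem.Str.isIn "FAILURES" l) = some start) :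
    extract_top_k_errors content k
      = PySem.Str.join "\n"
          ((PySem.Str.splitlines content)[start]'((List.findIdx?_eq_some_iff_getElem.mp hfind).1)
            :: ((PySem.Str.splitlines content).drop (start + 1)).take
                 (pvCutIdx (k - (((PySem.Str.splitlines content).take start).filter pvSep).length)
                   (pvSepIdx ((PySem.Str.splitlines content).drop (start + 1)))
                   ((PySem.Str.splitlines content).drop (start + 1)).length)) := by
  obtain ⟨hlt, hsf, hbefore⟩ := List.findIdx?_eq_some_iff_getElem.mp hfind
  simp only [extract_top_k_errors]
  have hdecomp : PySem.Str.splitlines content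
      = (PySem.Str.splitlines content).take start
        ++ (PySem.Str.splitlines content)[start] :: (PySem.Str.splitlines content).drop (start + 1) := by
    rw [List.getElem_cons_drop hlt, List.take_append_drop]
  have hall : ∀ l ∈ (PySem.Str.splitlines content).take start, pvHasF l = false := by
    intro l hl
    obtain ⟨j, hj, rfl⟩ := List.mem_take_iff_getElem.mp hl
    have h := hbefore j (by omega)
    simpa [pvHasF] using h
  have hstep1 : aStep k ([], false, 0 + ((((PySem.Str.splitlines content).take start).filter pvSep).length : Int))
      (PySem.Str.splitlines content)[start]
      = ([(PySem.Str.splitlines content)[start]], true,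
         0 + ((((PySem.Str.splitlines content).take start).filter pvSep).length : Int)) := by
    have hsf' := hsf
    simp at hsf'
    simp [aStep, hsf']
  have hA : ((PySem.Str.splitlines content).foldl (aStep k) ([], false, 0)).1
      = (PySem.Str.splitlines content)[start]
        :: pvWin k ((((PySem.Str.splitlines content).take start).filter pvSep).length : Int)
             ((PySem.Str.splitlines content).drop (start + 1)) := by
    conv_lhs => rw [hdecomp]
    rw [List.foldl_append, pvFoldPre k _ 0 hall, List.foldl_cons, hstep1, pvFoldMain]
    simp
  rw [hA, pvWinCut]

theorem pvAltEq (content : String) (k : Int) (hk : 0 ≤ k) (start : Nat)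
    (hfind : (PySem.Str.splitlines content).findIdx? (fun l => PySem.Str.isIn "FAILURES" l) = some start) :
    extract_top_k_errors_alt content k
      = PySem.Str.join "\n"
          ((PySem.Str.splitlines content)[start]'((List.findIdx?_eq_some_iff_getElem.mp hfind).1)
            :: ((PySem.Str.splitlines content).drop (start + 1)).take
                 (pvCutIdx k (pvSepIdx ((PySem.Str.splitlines content).drop (start + 1)))
                   ((PySem.Str.splitlines content).drop (start + 1)).length)) := by
  obtain ⟨hlt, _, _⟩ := List.findIdx?_eq_some_iff_getElem.mp hfind
  unfold extract_top_k_errors_alt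
  simp only [hfind]
  rw [List.getElem?_eq_getElem hlt]
  simp only [Option.getD_some]
  rw [pvStopEq k hk]

-- facts about the separator-index table
theorem pvSepIdxLen (ls : List String) : (pvSepIdx ls).length = ls.countP pvSep := by
  induction ls with
  | nil => simp [pvSepIdx]
  | cons l ls ih =>
    cases hs : pvSep l <;> simp [pvSepIdx, hs, List.countP_cons, ih]

theorem pvSepIdxPairwise (ls : List String) : (pvSepIdx ls).Pairwise (· < ·) := by
  induction ls with
  | nil => simp [pvSepIdx]
  | cons l ls ih =>
    have hmap : ((pvSepIdx ls).map (· + 1)).Pairwise (· < ·) := by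
      rw [List.pairwise_map]
      exact ih.imp (by omega)
    cases hs : pvSep l <;> simp only [pvSepIdx, hs, Bool.false_eq_true, if_false, if_true]
    · exact hmap
    · exact List.pairwise_cons.mpr
        ⟨fun j hj => by obtain ⟨i, _, rfl⟩ := List.mem_map.mp hj; omega, hmap⟩

theorem pvSepIdxGe (ls : List String) (m : Nat) (hm : m < (pvSepIdx ls).length) :
    m ≤ (pvSepIdx ls)[m] := by
  have hp := (List.pairwise_iff_getElem).mp (pvSepIdxPairwise ls)
  induction m with
  | zero => exact Nat.zero_le _
  | succ m ih =>
    have h1 := ih (by omega)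
    have h2 := hp m (m + 1) (by omega) hm (by omega)
    omega

-- when k ≥ 0, the k-budget cut is nonzero iff the tail is nonempty and not (k = 0 with a leading separator)
theorem pvCutBNe (t : List String) (k : Int) (hk : 0 ≤ k) :
    pvCutIdx k (pvSepIdx t) t.length ≠ 0
      ↔ (t.length ≠ 0 ∧ (0 < k ∨ ¬ pvSep (t.headD "") = true)) := by
  cases t with
  | nil =>
    unfold pvCutIdx
    split <;> simp [pvSepIdx]
  | cons l ls =>
    unfold pvCutIdx
    rw [if_neg (by omega)]
    by_cases hk0 : k = 0
    · subst hk0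
      cases hs : pvSep l <;>
        simp only [pvSepIdx, hs, Bool.false_eq_true, if_false, if_true, Int.toNat_zero]
      · simp only [List.getElem?_map]
        cases hi : (pvSepIdx ls)[0]? <;> simp [hi, hs]
      · simp [hs]
    · have hlt : 0 < k := by omega
      have hpos : 0 < k.toNat := by omega
      constructor
      · intro hne
        refine ⟨by simp, Or.inl hlt⟩
      · intro _
        cases hj : (pvSepIdx (l :: ls))[k.toNat]? with
        | none => simp [hj]
        | some j =>
          have hmem : j ∈ pvSepIdx (l :: ls) := List.mem_of_getElem? hj
          have hlen : k.toNat < (pvSepIdx (l :: ls)).length := (List.getElem?_eq_some_iff.mp hj).1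
          have hje : (pvSepIdx (l :: ls))[k.toNat] = j := (List.getElem?_eq_some_iff.mp hj).2
          have := pvSepIdxGe (l :: ls) k.toNat hlen
          simp [hj]
          omega

-- the two cuts differ exactly on D_'s arithmetic condition (k ≥ 0)
theorem pvCutNe (t : List String) (k : Int) (p : Nat) (hk : 0 ≤ k) :
    pvCutIdx (k - p) (pvSepIdx t) t.length ≠ pvCutIdx k (pvSepIdx t) t.length
      ↔ (t.length ≠ 0 ∧ 0 < p ∧ k < p + t.countP pvSep ∧ (0 < k ∨ ¬ pvSep (t.headD "") = true)) := by
  have hlen := pvSepIdxLen t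
  by_cases hp : p = 0
  · subst hp
    simp
  · by_cases hkp : k < (p : Int)
    · have hA : pvCutIdx (k - p) (pvSepIdx t) t.length = 0 := by
        unfold pvCutIdx
        rw [if_pos (by omega)]
      rw [hA, ne_comm, pvCutBNe t k hk]
      constructor
      · rintro ⟨h1, h2⟩
        exact ⟨h1, by omega, by omega, h2⟩
      · rintro ⟨h1, _, _, h4⟩
        exact ⟨h1, h4⟩
    · have hgp : (p : Int) ≤ k := by omega
      have h0k : 0 < k := by omega
      by_cases hc : (k - p).toNat < (pvSepIdx t).length
      · have hje : (pvSepIdx t)[(k - p).toNat]? = some (pvSepIdx t)[(k - p).toNat] :=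
          List.getElem?_eq_getElem hc
        have hA : pvCutIdx (k - p) (pvSepIdx t) t.length = (pvSepIdx t)[(k - p).toNat] := by
          unfold pvCutIdx
          rw [if_neg (by omega), hje]
        have hlt : (pvSepIdx t)[(k - p).toNat] < t.length :=
          pvSepIdxLt t _ (List.getElem_mem hc)
        have hmono := (List.pairwise_iff_getElem).mp (pvSepIdxPairwise t)
        have hBgt : (pvSepIdx t)[(k - p).toNat] < pvCutIdx k (pvSepIdx t) t.length := by
          unfold pvCutIdx
          rw [if_neg (by omega)]
          cases hj : (pvSepIdx t)[k.toNat]? with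
          | none => simpa using hlt
          | some j =>
            have hlen2 : k.toNat < (pvSepIdx t).length := (List.getElem?_eq_some_iff.mp hj).1
            have hje2 : (pvSepIdx t)[k.toNat] = j := (List.getElem?_eq_some_iff.mp hj).2
            have := hmono (k - p).toNat k.toNat hc hlen2 (by omega)
            simp only [Option.getD_some]
            omega
        constructor
        · intro _
          exact ⟨by omega, by omega, by omega, Or.inl h0k⟩
        · intro _
          rw [hA]
          omega
      · have hA : pvCutIdx (k - p) (pvSepIdx t) t.length = t.length := by
          unfold pvCutIdx
          rw [if_neg (by omega), List.getElem?_eq_none (by omega)]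
        have hB : pvCutIdx k (pvSepIdx t) t.length = t.length := by
          unfold pvCutIdx
          rw [if_neg (by omega), List.getElem?_eq_none (by omega)]
        rw [hA, hB]
        constructor
        · intro h
          exact absurd rfl h
        · rintro ⟨_, _, h3, _⟩
          omega

-- D_ in terms of the index-table cut, once the FAILURES position is known
theorem pvDIff (content : String) (k : Int) (hk : 0 ≤ k) (start : Nat)
    (hfind : (PySem.Str.splitlines content).findIdx? (fun l => PySem.Str.isIn "FAILURES" l) = some start) :
    D_extract_top_k_errors content k
      ↔ pvCutIdx (k - (((PySem.Str.splitlines content).take start).filter pvSep).length)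
            (pvSepIdx ((PySem.Str.splitlines content).drop (start + 1)))
            ((PySem.Str.splitlines content).drop (start + 1)).length
          ≠ pvCutIdx k (pvSepIdx ((PySem.Str.splitlines content).drop (start + 1)))
            ((PySem.Str.splitlines content).drop (start + 1)).length := by
  obtain ⟨hlt, hfi⟩ := List.findIdx?_eq_some_iff_findIdx_eq.mp hfind
  have htw : (PySem.Str.splitlines content).takeWhile (!PySem.Str.isIn "FAILURES" ·)
      = (PySem.Str.splitlines content).take start := by
    rw [List.takeWhile_eq_take_findIdx_not]
    congr 1
    rw [← hfi]
    congr 1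
    funext l
    simp
  simp only [D_extract_top_k_errors, htw, List.length_take, Nat.succ_eq_add_one]
  have hmin : min start (PySem.Str.splitlines content).length = start := by omega
  rw [hmin, pvCutNe _ _ _ hk, List.countP_eq_length_filter]

-- ===== VERDICT (by name: the statement is the Claim_ definition above) =====
theorem extract_top_k_errors_spec : Claim_unchanged_extract_top_k_errors := by
  intro content k _ hk hnd
  cases hfind : (PySem.Str.splitlines content).findIdx? (fun l => PySem.Str.isIn "FAILURES" l) with
  | none =>
    have hall : ∀ l ∈ PySem.Str.splitlines content, pvHasF l = false := by
      intro l hl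
      have h := List.findIdx?_eq_none_iff.mp hfind l hl
      simpa [pvHasF] using h
    unfold extract_top_k_errors extract_top_k_errors_alt
    simp only [hfind]
    rw [show (PySem.Str.splitlines content).foldl (aStep k) ([], false, 0)
        = ([], false, 0 + (((PySem.Str.splitlines content).filter pvSep).length : Int))
      from pvFoldPre k _ 0 hall]
    rfl
  | some start =>
    have hcut := not_not.mp ((pvDIff content k hk start hfind).not.mp hnd)
    rw [pvMainEq content k start hfind, pvAltEq content k hk start hfind, hcut]

theorem extract_top_k_errors_changed : Claim_changed_extract_top_k_errors := by
  unfold Claim_changed_extract_top_k_errors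
  decide

theorem extract_top_k_errors_tight : Claim_exact_extract_top_k_errors := by
  intro content k _ hk hd
  cases hfind : (PySem.Str.splitlines content).findIdx? (fun l => PySem.Str.isIn "FAILURES" l) with
  | none =>
    have hall := List.findIdx?_eq_none_iff.mp hfind
    have htw : (PySem.Str.splitlines content).takeWhile (!PySem.Str.isIn "FAILURES" ·)
        = PySem.Str.splitlines content :=
      List.takeWhile_eq_self_iff.mpr (fun l hl => by simpa using hall l hl)
    simp only [D_extract_top_k_errors, htw] at hd
    rw [List.drop_eq_nil_of_le (by omega)] at hd
    exact absurd rfl hd.1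
  | some start =>
    rw [pvMainEq content k start hfind, pvAltEq content k hk start hfind]
    exact pvJoinTakeNe _ _ _ _ (pvCutLe _ _) (pvCutLe _ _) ((pvDIff content k hk start hfind).mp hd)
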